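-- pv_equiv track=rewrite | github.com/nick-gerrard/pwhl-stats | backend/live/firebase.py | _parse_power_play
-- ===== SOURCE A (Python) =====
-- def _is_active_penalty(penalty: dict) -> bool:
--     return (
--         penalty["PenaltyShot"] == 0
--         and penalty["PowerPlay"] == 1
--         and penalty["TimeStartSet"] == 1
--     )
--
-- def _parse_power_play(game_penalties: dict) -> dict:
--     active = [p for p in game_penalties.values() if _is_active_penalty(p)]
--     home_penalties = sum(1 for p in active if p["Home"] == 1)
--     visitor_penalties = sum(1 for p in active if p["Home"] == 0)
--     return {
--         # home is on PP when visitor has more players in the box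
--         "home": visitor_penalties > home_penalties,
--         # visitor is on PP when home has more players in the box
--         "visitor": home_penalties > visitor_penalties,
--     }
-- ===== SOURCE B (Python) =====
-- def _parse_power_play(game_penalties: dict) -> dict:
--     # single pass keeping a running home-minus-visitor differential
--     diff = 0
--     for p in game_penalties.values():
--         if p["PenaltyShot"] == 0 and p["PowerPlay"] == 1 and p["TimeStartSet"] == 1:
--             h = p["Home"]
--             if h == 1:
--                 diff += 1
--             elif h == 0:
--                 diff -= 1
--     return {"home": diff < 0, "visitor": diff > 0}
-- ===== Notes on version B (the rewrite author's own statement) =====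
-- stated objective: simpler
-- what changed: Replaces the intermediate active list plus two counting passes with a single pass that maintains one running home-minus-visitor differential and compares it to zero.
import Mathlib
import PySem

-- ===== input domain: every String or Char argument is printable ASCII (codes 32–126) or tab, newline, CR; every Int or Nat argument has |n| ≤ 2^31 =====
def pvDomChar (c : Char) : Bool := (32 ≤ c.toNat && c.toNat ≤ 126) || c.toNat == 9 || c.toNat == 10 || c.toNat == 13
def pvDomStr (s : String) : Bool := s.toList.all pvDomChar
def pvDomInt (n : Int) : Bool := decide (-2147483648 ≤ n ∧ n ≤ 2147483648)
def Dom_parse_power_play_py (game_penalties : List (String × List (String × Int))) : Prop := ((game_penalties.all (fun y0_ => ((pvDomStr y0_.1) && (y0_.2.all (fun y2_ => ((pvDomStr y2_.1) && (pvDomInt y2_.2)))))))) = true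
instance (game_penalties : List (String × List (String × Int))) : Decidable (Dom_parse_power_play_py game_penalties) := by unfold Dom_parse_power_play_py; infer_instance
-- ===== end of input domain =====

-- B replaces A's intermediate active list plus two counting passes by a single pass
-- maintaining one running home-minus-visitor differential (objective: simpler).

-- ===== PORT A =====
-- helper _is_active_penalty (missing keys handled by Pre_: Python raises KeyError there)
def pvIsActivePenalty (p : List (String × Int)) : Bool :=
  ((PySem.Dict.ofList p).get? "PenaltyShot" == some 0) &&
  ((PySem.Dict.ofList p).get? "PowerPlay" == some 1) &&
  ((PySem.Dict.ofList p).get? "TimeStartSet" == some 1)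

def parse_power_play_py (game_penalties : List (String × List (String × Int))) : List (String × Bool) :=
  let active := ((PySem.Dict.ofList game_penalties).values).filter pvIsActivePenalty
  let home_penalties : Int := ((active.filter (fun p => (PySem.Dict.ofList p).get? "Home" == some 1)).length : Int)
  let visitor_penalties : Int := ((active.filter (fun p => (PySem.Dict.ofList p).get? "Home" == some 0)).length : Int)
  [("home", decide (visitor_penalties > home_penalties)),
   ("visitor", decide (home_penalties > visitor_penalties))]

-- ===== PORT B =====
def pvStep (d : Int) (p : List (String × Int)) : Int :=
  if ((PySem.Dict.ofList p).get? "PenaltyShot" == some 0) &&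
     ((PySem.Dict.ofList p).get? "PowerPlay" == some 1) &&
     ((PySem.Dict.ofList p).get? "TimeStartSet" == some 1) then
    let h := (PySem.Dict.ofList p).get? "Home"
    if h == some 1 then d + 1 else if h == some 0 then d - 1 else d
  else d

def parse_power_play_py_alt (game_penalties : List (String × List (String × Int))) : List (String × Bool) :=
  let diff : Int := ((PySem.Dict.ofList game_penalties).values).foldl pvStep 0
  [("home", decide (diff < 0)), ("visitor", decide (diff > 0))]

-- ===== PRECONDITION & SPEC =====
-- Pre_ excludes exactly the inputs on which the Python A raises KeyError: a penalty dict
-- missing a key along the short-circuiting chain PenaltyShot / PowerPlay / TimeStartSet / Home.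
def Pre_parse_power_play_py (game_penalties : List (String × List (String × Int))) : Prop :=
  ∀ p ∈ (PySem.Dict.ofList game_penalties).values,
    ((PySem.Dict.ofList p).get? "PenaltyShot").isSome ∧
    ((PySem.Dict.ofList p).get? "PenaltyShot" = some 0 →
      ((PySem.Dict.ofList p).get? "PowerPlay").isSome ∧
      ((PySem.Dict.ofList p).get? "PowerPlay" = some 1 →
        ((PySem.Dict.ofList p).get? "TimeStartSet").isSome ∧
        ((PySem.Dict.ofList p).get? "TimeStartSet" = some 1 →
          ((PySem.Dict.ofList p).get? "Home").isSome)))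
instance (game_penalties : List (String × List (String × Int))) : Decidable (Pre_parse_power_play_py game_penalties) := by unfold Pre_parse_power_play_py; infer_instance
def pvWitness_parse_power_play_py : (List (String × List (String × Int))) :=
  [("p1", [("PenaltyShot", 0), ("PowerPlay", 1), ("TimeStartSet", 1), ("Home", 1)])]

def Spec_parse_power_play_py (game_penalties : List (String × List (String × Int))) (out : List (String × Bool)) : Prop := out = parse_power_play_py_alt game_penalties
instance (game_penalties : List (String × List (String × Int))) (out : List (String × Bool)) : Decidable (Spec_parse_power_play_py game_penalties out) := by unfold Spec_parse_power_play_py; infer_instance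

-- ===== CLAIM (what is proved, stated in full; the proofs are below) =====
def Claim_equal_parse_power_play_py : Prop := ∀ (game_penalties : List (String × List (String × Int))), Dom_parse_power_play_py game_penalties → Pre_parse_power_play_py game_penalties → Spec_parse_power_play_py game_penalties (parse_power_play_py game_penalties)

-- ===== LEMMAS AND PROOFS =====
lemma pvFoldl_diff (l : List (List (String × Int))) (d : Int) :
    l.foldl pvStep d =
      d + (((l.filter pvIsActivePenalty).filter (fun p => (PySem.Dict.ofList p).get? "Home" == some 1)).length : Int)
        - (((l.filter pvIsActivePenalty).filter (fun p => (PySem.Dict.ofList p).get? "Home" == some 0)).length : Int) := by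
  induction l generalizing d with
  | nil => simp
  | cons p t ih =>
    simp only [List.foldl_cons, ih, List.filter_cons, pvStep, pvIsActivePenalty]
    by_cases ha : (((PySem.Dict.ofList p).get? "PenaltyShot" == some 0) &&
        ((PySem.Dict.ofList p).get? "PowerPlay" == some 1) &&
        ((PySem.Dict.ofList p).get? "TimeStartSet" == some 1)) = true
    · simp only [ha, if_pos]
      by_cases h1 : ((PySem.Dict.ofList p).get? "Home" == some 1) = true
      · have h0 : ((PySem.Dict.ofList p).get? "Home" == some 0) = false := by
          revert h1; cases (PySem.Dict.ofList p).get? "Home" <;> simp; omega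
        simp [h1, h0]; ring
      · simp only [h1, if_neg, Bool.false_eq_true, not_false_eq_true]
        by_cases h0 : ((PySem.Dict.ofList p).get? "Home" == some 0) = true
        · simp [h1, h0]; ring
        · simp [h1, h0]
    · simp [ha]

-- ===== VERDICT (by name: the statement is the Claim_ definition above) =====
theorem parse_power_play_py_spec : Claim_equal_parse_power_play_py := by
  intro gp _ _
  unfold Spec_parse_power_play_py parse_power_play_py parse_power_play_py_alt
  rw [pvFoldl_diff]
  simp only [List.cons.injEq, Prod.mk.injEq, and_true, true_and]
  constructor <;> · rw [decide_eq_decide]; omega
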